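-- pv_equiv track=rewrite | github.com/mearafGitHub/Algorithims | edit_string.py | edit_y_x
-- ===== SOURCE A (Python) =====
-- def edit_y_x(x, y):
--     if len(x) <= len(y):
--         limit = len(x)
--     else:
--         limit = len(y)
--     yy = []
--     xx = []
--     for s in x:
--         xx.append(s)
--     for c in y:
--         yy.append(c)
--
--     for i in range(limit):
--         if xx[i] != yy[i]:
--             yy[i] = xx[i]
--     if len(yy) < len(xx):
--         for j in range(len(yy), len(xx)):
--             yy.append(xx[j])
--
--     return yy
-- ===== SOURCE B (Python) =====
-- def edit_y_x(x, y):
--     return list(x) + list(y[len(x):])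
-- ===== Notes on version B (the rewrite author's own statement) =====
-- stated objective: simpler
-- what changed: B builds the result directly as list(x) + list(y[len(x):]) - start from all of x and append y's overhang - removing A's copy loops, the elementwise compare/overwrite pass over y, and the conditional tail-append loop.
import Mathlib
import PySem

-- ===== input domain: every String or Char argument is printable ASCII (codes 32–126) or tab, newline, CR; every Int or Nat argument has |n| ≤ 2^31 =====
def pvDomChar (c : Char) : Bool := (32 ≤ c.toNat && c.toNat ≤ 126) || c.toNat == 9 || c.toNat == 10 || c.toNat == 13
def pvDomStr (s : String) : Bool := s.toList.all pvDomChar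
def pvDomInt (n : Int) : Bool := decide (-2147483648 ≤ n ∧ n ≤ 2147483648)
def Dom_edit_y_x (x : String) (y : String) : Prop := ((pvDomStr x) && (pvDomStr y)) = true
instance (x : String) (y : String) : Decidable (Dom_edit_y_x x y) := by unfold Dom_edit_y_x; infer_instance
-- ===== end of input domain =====

-- B replaces A's copy loops, elementwise overwrite pass and tail-append loop by
-- list(x) + list(y[len(x):]); equal return value proved on Dom (objective: simpler).

-- ===== PORT A =====
-- literal transliteration of A: min-length limit, element-copy loops, overwrite pass, tail append
def edit_y_x (x : String) (y : String) : List String :=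
  let limit : Int :=
    if (x.toList.length : Int) ≤ (y.toList.length : Int) then (x.toList.length : Int)
    else (y.toList.length : Int)
  let xx : List String := x.toList.foldl (fun acc s => acc ++ [String.mk [s]]) []
  let yy : List String := y.toList.foldl (fun acc c => acc ++ [String.mk [c]]) []
  let yy :=
    (PySem.List.pyRange 0 limit 1).foldl
      (fun yy i =>
        if PySem.List.pyGetD xx i "" ≠ PySem.List.pyGetD yy i "" then
          yy.set i.toNat (PySem.List.pyGetD xx i "")
        else yy) yy
  if yy.length < xx.length then
    (PySem.List.pyRange (yy.length : Int) (xx.length : Int) 1).foldl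
      (fun acc j => acc ++ [PySem.List.pyGetD xx j ""]) yy
  else yy

-- ===== PORT B =====
-- literal transliteration of B: list(x) + list(y[len(x):])
def edit_y_x_alt (x : String) (y : String) : List String :=
  x.toList.map (fun c => String.mk [c]) ++
    (PySem.List.slice y.toList (some (x.toList.length : Int)) none).map (fun c => String.mk [c])

-- ===== PRECONDITION & SPEC =====
def Spec_edit_y_x (x : String) (y : String) (out : List String) : Prop := out = edit_y_x_alt x y
instance (x : String) (y : String) (out : List String) : Decidable (Spec_edit_y_x x y out) := by unfold Spec_edit_y_x; infer_instance

-- ===== CLAIM (what is proved, stated in full; the proofs are below) =====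
def Claim_equal_edit_y_x : Prop := ∀ (x : String) (y : String), Dom_edit_y_x x y → Spec_edit_y_x x y (edit_y_x x y)

-- ===== LEMMAS AND PROOFS =====

-- A's overwrite loop turns the first n entries of ys into those of xs.
theorem pvOverwriteLoop (xs ys : List String) (n : Nat) (hx : n ≤ xs.length) (hy : n ≤ ys.length) :
    (PySem.List.pyRange 0 (n : Int) 1).foldl
      (fun yy i =>
        if PySem.List.pyGetD xs i "" ≠ PySem.List.pyGetD yy i "" then
          yy.set i.toNat (PySem.List.pyGetD xs i "")
        else yy) ys
    = xs.take n ++ ys.drop n := by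
  induction n with
  | zero => simp [PySem.List.pyRange_one_eq_nil]
  | succ m ih =>
    have hm : (0 : Int) ≤ (m : Int) := by positivity
    have hrange : PySem.List.pyRange 0 ((m : Int) + 1) 1
        = PySem.List.pyRange 0 (m : Int) 1 ++ [(m : Int)] :=
      PySem.List.pyRange_one_succ_right hm
    have hcast : ((Nat.succ m : Nat) : Int) = (m : Int) + 1 := by push_cast; ring
    rw [hcast, hrange, List.foldl_append, ih (by omega) (by omega)]
    simp only [List.foldl_cons, List.foldl_nil]
    have hgx : PySem.List.pyGetD xs ((m : Nat) : Int) "" = xs[m]'(by omega) := by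
      rw [PySem.List.pyGetD_natCast]
      exact List.getD_eq_getElem xs "" (by omega)
    have hlen : (xs.take m).length = m := by simp; omega
    have hdrop : ys.drop m = ys[m]'(by omega) :: ys.drop (m + 1) :=
      List.drop_eq_getElem_cons (by omega)
    have hgy : PySem.List.pyGetD (xs.take m ++ ys.drop m) ((m : Nat) : Int) "" = ys[m]'(by omega) := by
      rw [PySem.List.pyGetD_natCast, hdrop]
      rw [List.getD_eq_getElem _ "" (by simp [hlen]; omega)]
      simp [List.getElem_append_right, hlen]
    have htake : xs.take (m + 1) = xs.take m ++ [xs[m]'(by omega)] := by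
      rw [List.take_succ]
      simp [List.getElem?_eq_getElem (by omega : m < xs.length)]
    rw [hgx, hgy]
    by_cases h : xs[m]'(by omega) = ys[m]'(by omega)
    · simp only [h, ne_eq, not_true_eq_false, if_neg, ite_false]
      rw [htake, hdrop, h]
      simp
    · simp only [ne_eq, h, not_false_iff, ite_true]
      have hnt : ((m : Nat) : Int).toNat = (xs.take m).length := by simp [hlen]
      rw [hnt, List.set_append_right _ _ (le_refl _), hdrop, Nat.sub_self, List.set_cons_zero, htake,
        List.append_assoc, List.singleton_append]
theorem pvCopyLoop (l : List Char) :
    l.foldl (fun acc c => acc ++ [String.mk [c]]) [] = l.map (fun c => String.mk [c]) := by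
  rw [PySem.List.foldl_append_singleton_eq_map]
  simp

-- A's tail-append loop over range(a, len xs) appends xs.drop a.
theorem pvAppendLoop (xs acc : List String) (a : Nat) :
    (PySem.List.pyRange (a : Int) (xs.length : Int) 1).foldl
      (fun acc j => acc ++ [PySem.List.pyGetD xs j ""]) acc
    = acc ++ xs.drop a := by
  rw [PySem.List.foldl_append_singleton_eq_map]
  rw [show (xs.length : Int) = (PySem.List.len xs) from by simp [PySem.List.len]]
  rw [PySem.List.map_pyGetD_pyRange xs "" (by positivity)]
  simp

-- ===== VERDICT (by name: the statement is the Claim_ definition above) =====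
theorem edit_y_x_spec : Claim_equal_edit_y_x := by
  intro x y _
  unfold Spec_edit_y_x edit_y_x edit_y_x_alt
  simp only [pvCopyLoop]
  set xs := x.toList.map (fun c => String.mk [c]) with hxs
  set ys := y.toList.map (fun c => String.mk [c]) with hys
  have hxl : xs.length = x.toList.length := by simp [hxs]
  have hyl : ys.length = y.toList.length := by simp [hys]
  rw [PySem.List.slice_from_natCast]
  have hmapdrop : (y.toList.drop x.toList.length).map (fun c => String.mk [c])
      = ys.drop x.toList.length := by simp [hys]
  rw [hmapdrop]
  have hlim : (if ((x.toList.length : Int)) ≤ ((y.toList.length : Int))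
        then ((x.toList.length : Int)) else ((y.toList.length : Int)))
      = ((min x.toList.length y.toList.length : Nat) : Int) := by
    split_ifs with hc <;> (push_cast [Nat.cast_min]; omega)
  rw [hlim, pvOverwriteLoop xs ys (min x.toList.length y.toList.length) (by omega) (by omega)]
  by_cases h : x.toList.length ≤ y.toList.length
  · have hmin : min x.toList.length y.toList.length = x.toList.length := Nat.min_eq_left h
    rw [hmin]
    rw [List.take_of_length_le (by omega : xs.length ≤ x.toList.length)]
    rw [if_neg (by
      simp only [List.length_append, List.length_take, List.length_drop, List.length_nil]
      omega)]
  · push_neg at h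
    have hmin : min x.toList.length y.toList.length = y.toList.length := Nat.min_eq_right (by omega)
    rw [hmin]
    rw [List.drop_of_length_le (by omega : ys.length ≤ y.toList.length)]
    have hlen2 : (xs.take y.toList.length ++ ([] : List String)).length = y.toList.length := by
      rw [List.length_append, List.length_take]
      simp only [List.length_nil]
      omega
    rw [if_pos (by rw [hlen2]; omega), hlen2]
    have := pvAppendLoop xs (xs.take y.toList.length ++ []) y.toList.length
    rw [this]
    rw [List.drop_of_length_le (by omega : ys.length ≤ x.toList.length)]
    simp
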